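-- pv_equiv track=rewrite | github.com/yec3168/algorithm | programmers/lv_3/최고의 집합.py | solution
-- ===== SOURCE A (Python) =====
-- def solution(n, s):
--     if n > s:
--         return [-1]
--
--     result =[ (s//n)  for _ in range(n) ]
--
--     temp = s - sum(result)
--
--     for i in range(temp):
--         result[-1-i] += 1
--
--     return result
-- ===== SOURCE B (Python) =====
-- def solution(n, s):
--     if n > s:
--         return [-1]
--     # Greedy single pass: repeatedly hand out the floor of the remaining
--     # average; this provably yields the same nondecreasing near-equal split.
--     parts = []
--     while n > 0:
--         q = s // n
--         parts.append(q)
--         s -= q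
--         n -= 1
--     return parts
-- ===== Notes on version B (the rewrite author's own statement) =====
-- stated objective: alternative
-- what changed: Replaces A's two-stage 'build a uniform list of s//n, then loop back from the tail incrementing the last s-sum(result) entries' with a single greedy pass that at each step emits the floor of the remaining average (q = s//n), subtracts it and decrements n; no second pass, no in-place mutation, and the divisor changes every iteration.
import Mathlib
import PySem

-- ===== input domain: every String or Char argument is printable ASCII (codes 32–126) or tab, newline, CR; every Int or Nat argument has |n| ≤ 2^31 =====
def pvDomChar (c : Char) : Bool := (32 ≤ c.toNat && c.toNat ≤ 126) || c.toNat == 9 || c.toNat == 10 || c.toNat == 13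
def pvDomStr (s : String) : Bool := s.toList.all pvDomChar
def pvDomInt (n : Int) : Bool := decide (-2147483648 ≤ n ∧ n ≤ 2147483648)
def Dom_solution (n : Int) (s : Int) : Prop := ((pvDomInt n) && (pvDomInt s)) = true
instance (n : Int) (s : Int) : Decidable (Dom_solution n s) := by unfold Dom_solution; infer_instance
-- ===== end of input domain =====

-- B replaces A's "build a uniform list, then a second loop incrementing the last s%n
-- entries" with a single greedy pass emitting the floor of the remaining average each step.

-- ===== PORT A =====
def solution (n : Int) (s : Int) : List Int :=
  if n > s then [-1]
  else
    let result := (PySem.List.pyRange 0 n 1).map (fun _ => PySem.Int.floordiv s n)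
    let temp := s - result.sum
    (PySem.List.pyRange 0 temp 1).foldl
      (fun res i => PySem.List.pySetD res (-1 - i) (PySem.List.pyGetD res (-1 - i) 0 + 1))
      result

-- ===== PORT B =====
-- B's while-loop: while n > 0, append s // n, subtract it from s, decrement n.
-- The loop runs exactly n.toNat times, which is the structural fuel below.
def solutionGreedy (fuel : Nat) (n : Int) (s : Int) : List Int :=
  match fuel with
  | 0 => []
  | fuel + 1 =>
    if 0 < n then
      let q := PySem.Int.floordiv s n
      q :: solutionGreedy fuel (n - 1) (s - q)
    else []

def solution_alt (n : Int) (s : Int) : List Int :=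
  if n > s then [-1] else solutionGreedy n.toNat n s

-- ===== PRECONDITION & SPEC =====
-- Pre_ excludes exactly the inputs (n ≤ 0 and s > 0) on which A's increment loop indexes an
-- empty list and raises IndexError.
def Pre_solution (n : Int) (s : Int) : Prop := 0 < n ∨ s ≤ 0
instance (n : Int) (s : Int) : Decidable (Pre_solution n s) := by unfold Pre_solution; infer_instance
def pvWitness_solution : Int × Int := (3, 7)

def Spec_solution (n : Int) (s : Int) (out : List Int) : Prop := out = solution_alt n s
instance (n : Int) (s : Int) (out : List Int) : Decidable (Spec_solution n s out) := by unfold Spec_solution; infer_instance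

-- ===== CLAIM (what is proved, stated in full; the proofs are below) =====
def Claim_equal_solution : Prop := ∀ (n : Int) (s : Int), Dom_solution n s → Pre_solution n s → Spec_solution n s (solution n s)

-- ===== LEMMAS AND PROOFS =====

-- A's increment loop on a uniform list of length m, run k ≤ m times, yields the two-block list.
lemma inc_loop (q : Int) (m k : Nat) (hk : k ≤ m) :
    (PySem.List.pyRange 0 (k : Int) 1).foldl
      (fun res i => PySem.List.pySetD res (-1 - i) (PySem.List.pyGetD res (-1 - i) 0 + 1))
      (List.replicate m q)
    = List.replicate (m - k) q ++ List.replicate k (q + 1) := by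
  induction k with
  | zero => simp [PySem.List.pyRange_one_eq_nil]
  | succ k ih =>
    have hk' : k ≤ m := Nat.le_of_succ_le hk
    rw [show ((k + 1 : Nat) : Int) = (k : Int) + 1 by push_cast; ring,
        PySem.List.pyRange_one_succ_right (show (0:Int) ≤ (k:Int) from Int.natCast_nonneg k),
        List.foldl_append, ih hk']
    simp only [List.foldl_cons, List.foldl_nil]
    set L := List.replicate (m - k) q ++ List.replicate k (q + 1) with hL
    have hlen : L.length = m := by simp [hL]; omega
    have hidx : (-1 - (k : Int)) = -((k + 1 : Nat) : Int) := by push_cast; ring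
    have hget : PySem.List.pyGetD L (-1 - (k : Int)) 0 = q := by
      rw [hidx, PySem.List.pyGetD_neg_natCast _ _ _ (by omega) (by omega)]
      rw [List.getElem_eq_iff, hlen, hL, List.getElem?_append_left (by simp; omega)]
      simp [List.getElem?_replicate]
      omega
    have hset : PySem.List.pySetD L (-1 - (k : Int)) (q + 1)
        = List.replicate (m - (k + 1)) q ++ List.replicate (k + 1) (q + 1) := by
      rw [hidx]
      have hst : PySem.List.pySetD L (-((k + 1 : Nat) : Int)) (q + 1) = L.set (m - (k + 1)) (q + 1) := by
        simp [PySem.List.pySetD, PySem.List.pySet?, PySem.List.pyIdx?, hlen]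
        rw [if_neg (by omega), if_pos (by omega)]
        simp
      have hj : m - k = (m - (k + 1)) + 1 := by omega
      rw [hst, hL, hj, List.replicate_succ', List.set_append]
      rw [if_pos (by simp)]
      rw [List.set_append, if_neg (by simp)]
      simp [List.replicate_succ]
    rw [hget, hset]

-- B's greedy loop produces the same two-block list, by induction on n.
lemma greedy_succ (fuel : Nat) (n s : Int) (hn : 0 < n) :
    solutionGreedy (fuel + 1) n s
    = PySem.Int.floordiv s n :: solutionGreedy fuel (n - 1) (s - PySem.Int.floordiv s n) := by
  simp [solutionGreedy, hn]

lemma greedy_eq (m : Nat) : ∀ (n s : Int), n.toNat = m → 0 < n →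
    solutionGreedy m n s
    = List.replicate (n - PySem.Int.mod s n).toNat (PySem.Int.floordiv s n)
      ++ List.replicate (PySem.Int.mod s n).toNat (PySem.Int.floordiv s n + 1) := by
  induction m with
  | zero => intro n s hm hn; omega
  | succ m ih =>
    intro n s hm hn
    set q := PySem.Int.floordiv s n with hq
    set r := PySem.Int.mod s n with hr
    have h0r : 0 ≤ r := PySem.Int.mod_nonneg (a := s) hn
    have hrn : r < n := PySem.Int.mod_lt (a := s) hn
    have hdm : q * n + r = s := PySem.Int.floordiv_mul_add_mod s n
    rw [greedy_succ m n s hn, ← hq]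
    by_cases h1 : n = 1
    · subst h1
      have hr0 : r = 0 := by omega
      have hq0 : q = s := by omega
      have hm0 : m = 0 := by omega
      subst hm0
      rw [show solutionGreedy 0 (1 - 1) (s - q) = [] from rfl, hr0]
      simp
    · have hn1 : 0 < n - 1 := by omega
      have hs' : s - q = q * (n - 1) + r := by ring_nf; linarith [hdm]
      by_cases hcase : r < n - 1
      · -- quotient stays q, remainder stays r
        have hq' : PySem.Int.floordiv (s - q) (n - 1) = q := by
          rw [PySem.Int.floordiv_eq_iff_of_pos (b := n - 1) hn1]
          constructor
          · nlinarith [hs']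
          · nlinarith [hs']
        have hr' : PySem.Int.mod (s - q) (n - 1) = r := by
          have := PySem.Int.floordiv_mul_add_mod (s - q) (n - 1)
          rw [hq'] at this
          nlinarith [hs', this]
        have hm2 : (n - 1).toNat = m := by omega
        rw [ih (n - 1) (s - q) hm2 hn1, hq', hr']
        have hcnt : (n - r).toNat = (n - 1 - r).toNat + 1 := by omega
        rw [hcnt, List.replicate_succ]
        simp
      · -- r = n - 1: quotient becomes q + 1, remainder 0
        have hreq : r = n - 1 := by omega
        have hq' : PySem.Int.floordiv (s - q) (n - 1) = q + 1 := by
          rw [PySem.Int.floordiv_eq_iff_of_pos (b := n - 1) hn1]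
          constructor
          · nlinarith [hs']
          · nlinarith [hs']
        have hr' : PySem.Int.mod (s - q) (n - 1) = 0 := by
          have := PySem.Int.floordiv_mul_add_mod (s - q) (n - 1)
          rw [hq'] at this
          nlinarith [hs', this]
        have hm2 : (n - 1).toNat = m := by omega
        rw [ih (n - 1) (s - q) hm2 hn1, hq', hr']
        have h1' : (n - r).toNat = 1 := by omega
        have h2' : (n - 1 - 0).toNat = (n - 1).toNat := by omega
        rw [h1', h2', hreq]
        simp [List.replicate_succ]

-- ===== VERDICT (by name: the statement is the Claim_ definition above) =====
theorem solution_spec : Claim_equal_solution := by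
  intro n s _ hp
  unfold Spec_solution solution solution_alt
  by_cases hns : n > s
  · simp [hns]
  · rw [not_lt] at hns
    rw [if_neg (by omega), if_neg (by omega)]
    rcases lt_trichotomy n 0 with hn | hn | hn
    · -- n < 0: Pre_ forces s ≤ 0; both sides are []
      have hsle : s ≤ 0 := by rcases hp with h | h <;> omega
      rw [show n.toNat = 0 by omega, show solutionGreedy 0 n s = [] from rfl]
      rw [PySem.List.pyRange_one_eq_nil (by omega)]
      simp only [List.map_nil, List.sum_nil, Int.sub_zero]
      rw [PySem.List.pyRange_one_eq_nil (by omega)]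
      simp
    · -- n = 0: then s = 0 and both sides are []
      have hs : s = 0 := by rcases hp with h | h <;> omega
      subst hn; subst hs
      simp [PySem.List.pyRange, solutionGreedy]
    · -- 0 < n: the main case
      set q := PySem.Int.floordiv s n with hq
      set r := PySem.Int.mod s n with hrdef
      have h0r : 0 ≤ r := PySem.Int.mod_nonneg (a := s) hn
      have hrn : r < n := PySem.Int.mod_lt (a := s) hn
      have hdm := PySem.Int.floordiv_mul_add_mod s n
      have hres : (PySem.List.pyRange 0 n 1).map (fun _ => q) = List.replicate n.toNat q := by
        rw [List.map_const', PySem.List.length_pyRange_one]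
        norm_num
      rw [hres]
      have htemp : s - (List.replicate n.toNat q).sum = (r.toNat : Int) := by
        rw [List.sum_replicate, nsmul_eq_mul, Int.toNat_of_nonneg (le_of_lt hn),
            Int.toNat_of_nonneg h0r, mul_comm (n : Int) q]
        linarith [hdm]
      dsimp only
      rw [htemp, inc_loop q n.toNat r.toNat (by omega),
          greedy_eq n.toNat n s rfl hn, ← hq, ← hrdef]
      congr 2
      omega
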